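-- pv_equiv track=rewrite | github.com/leonsolon/coding-challenges | codility/lesson05/genomic-range-query/cleyton.py | solution
-- ===== SOURCE A (Python) =====
-- def solution(S, P, Q): # Total score: 100% (100% performance)
--
--     res = []
--
--     for p, q in zip(P,Q):
--         s = S[p : q + 1]
--         if(s.find('A') != -1):
--             res.append(1)
--         elif (s.find('C') != -1):
--             res.append(2)
--         elif (s.find('G') != -1):
--             res.append(3)
--         else:
--             res.append(4)
--
--     return res
-- ===== SOURCE B (Python) =====
-- def _prefix(S, ch):
--     # pre[i] = number of occurrences of ch among the first i characters of S
--     pre = [0]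
--     tot = 0
--     for c in S:
--         tot += (c == ch)
--         pre.append(tot)
--     return pre
--
--
-- def solution(S, P, Q):
--     n = len(S)
--     pa = _prefix(S, 'A')
--     pc = _prefix(S, 'C')
--     pg = _prefix(S, 'G')
--
--     res = []
--     for p, q in zip(P, Q):
--         # normalize the query bounds the way slicing does
--         lo, hi, _ = slice(p, q + 1).indices(n)
--         if pa[hi] > pa[lo]:
--             res.append(1)
--         elif pc[hi] > pc[lo]:
--             res.append(2)
--         elif pg[hi] > pg[lo]:
--             res.append(3)
--         else:
--             res.append(4)
--     return res
-- ===== Notes on version B (the rewrite author's own statement) =====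
-- stated objective: alternative
-- what changed: Replaces the per-query string slice plus linear find scans with three per-nucleotide prefix-count arrays built once; each query is answered by normalizing its bounds with slice().indices() and comparing two prefix counts per nucleotide instead of scanning the slice.
import Mathlib
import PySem

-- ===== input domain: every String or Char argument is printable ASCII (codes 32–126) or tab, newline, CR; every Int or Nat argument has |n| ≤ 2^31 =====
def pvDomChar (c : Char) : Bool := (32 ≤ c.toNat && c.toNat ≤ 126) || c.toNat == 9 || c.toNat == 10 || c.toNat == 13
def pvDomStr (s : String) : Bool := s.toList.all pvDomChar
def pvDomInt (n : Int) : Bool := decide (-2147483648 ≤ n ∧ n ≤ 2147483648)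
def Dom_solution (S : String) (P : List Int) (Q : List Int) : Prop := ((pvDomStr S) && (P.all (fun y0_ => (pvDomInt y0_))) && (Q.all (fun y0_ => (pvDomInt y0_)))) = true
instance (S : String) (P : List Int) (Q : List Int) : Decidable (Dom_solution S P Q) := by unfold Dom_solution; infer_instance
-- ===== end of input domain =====

-- B replaces A's per-query slice + linear find scans by three prefix-count arrays
-- built once; each query compares two prefix counts per nucleotide (objective: alternative).

-- ===== PORT A =====
-- literal transliteration of A: loop over zip(P,Q), slice, find each nucleotide
def solution (S : String) (P : List Int) (Q : List Int) : List Int :=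
  (P.zip Q).foldl (fun res pq =>
    let s := PySem.Str.slice S (some pq.1) (some (pq.2 + 1))
    if PySem.Str.find s "A" ≠ -1 then res ++ [1]
    else if PySem.Str.find s "C" ≠ -1 then res ++ [2]
    else if PySem.Str.find s "G" ≠ -1 then res ++ [3]
    else res ++ [4]) []

-- ===== PORT B =====
-- _prefix(S, ch) from Source B: running total appended to a growing list
def prefixCount (s : List Char) (c : Char) : List Int :=
  (s.foldl (fun (acc : List Int × Int) ch =>
      let t := acc.2 + (if ch == c then 1 else 0)
      (acc.1 ++ [t], t)) ([0], 0)).1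

def solution_alt (S : String) (P : List Int) (Q : List Int) : List Int :=
  let cs := S.toList
  let n := cs.length
  let pa := prefixCount cs 'A'
  let pc := prefixCount cs 'C'
  let pg := prefixCount cs 'G'
  (P.zip Q).foldl (fun res pq =>
    -- 'lo, hi, _ = slice(p, q+1).indices(n)': for step 1, slice.indices normalizes
    -- each bound exactly as PySem.List.clampIdx does
    let lo := PySem.List.clampIdx n pq.1
    let hi := PySem.List.clampIdx n (pq.2 + 1)
    -- pa[hi] etc.: lo, hi ≤ n = pa.length - 1, so the Python index never raises; getD is exact here
    if pa.getD hi 0 > pa.getD lo 0 then res ++ [1]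
    else if pc.getD hi 0 > pc.getD lo 0 then res ++ [2]
    else if pg.getD hi 0 > pg.getD lo 0 then res ++ [3]
    else res ++ [4]) []

-- ===== PRECONDITION & SPEC =====
def Spec_solution (S : String) (P : List Int) (Q : List Int) (out : List Int) : Prop := out = solution_alt S P Q
instance (S : String) (P : List Int) (Q : List Int) (out : List Int) : Decidable (Spec_solution S P Q out) := by unfold Spec_solution; infer_instance

-- ===== CLAIM (what is proved, stated in full; the proofs are below) =====
def Claim_equal_solution : Prop := ∀ (S : String) (P : List Int) (Q : List Int), Dom_solution S P Q → Spec_solution S P Q (solution S P Q)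

-- ===== LEMMAS AND PROOFS =====

-- invariant of Source B's _prefix loop
theorem prefixCount_aux (c : Char) (s : List Char) : ∀ (done : List Char),
    (s.foldl (fun (acc : List Int × Int) ch =>
      let t := acc.2 + (if ch == c then 1 else 0)
      (acc.1 ++ [t], t))
      ((List.range (done.length + 1)).map (fun k => ((done.take k).count c : Int)),
        (done.count c : Int)))
    = ((List.range ((done ++ s).length + 1)).map (fun k => (((done ++ s).take k).count c : Int)),
        ((done ++ s).count c : Int)) := by
  induction s with
  | nil => intro done; simp
  | cons a s ih =>
    intro done
    have hc : (done.count c : Int) + (if a == c then 1 else 0)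
        = ((done ++ [a]).count c : Int) := by
      rw [List.count_append]; push_cast; simp [List.count_singleton]
    have hpre : (List.range (done.length + 1)).map (fun k => ((done.take k).count c : Int))
          ++ [((done ++ [a]).count c : Int)]
        = (List.range ((done ++ [a]).length + 1)).map
            (fun k => (((done ++ [a]).take k).count c : Int)) := by
      have hlen : (done ++ [a]).length = done.length + 1 := by simp
      rw [hlen]
      conv_rhs => rw [List.range_succ]
      rw [List.map_append]
      congr 1
      · apply List.map_congr_left
        intro k hk
        rw [List.mem_range] at hk
        rw [List.take_append_of_le_length (by omega)]
      · have hfull : (done ++ [a]).take (done.length + 1) = done ++ [a] :=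
          List.take_of_length_le (by simp)
        simp [hfull]
    rw [List.foldl_cons]
    have h2 := ih (done ++ [a])
    rw [← hpre] at h2
    rw [← hc] at h2
    rw [List.append_cons]
    exact h2

theorem prefixCount_eq (s : List Char) (c : Char) :
    prefixCount s c = (List.range (s.length + 1)).map (fun k => ((s.take k).count c : Int)) := by
  have := prefixCount_aux c s []
  simpa [prefixCount] using congrArg Prod.fst this

theorem prefixCount_getD (s : List Char) (c : Char) (k : Nat) (hk : k ≤ s.length) :
    (prefixCount s c).getD k 0 = ((s.take k).count c : Int) := by
  rw [prefixCount_eq]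
  exact PySem.List.getD_map_range _ _ _ _ (by omega)

-- the prefix-count comparison detects membership in the slice segment
theorem count_seg (s : List Char) (c : Char) (lo hi : Nat) :
    (((s.take lo).count c : Int) < ((s.take hi).count c : Int))
      ↔ c ∈ List.take (hi - lo) (s.drop lo) := by
  rw [Nat.cast_lt]
  by_cases h : lo ≤ hi
  · obtain ⟨m, rfl⟩ : ∃ m, hi = lo + m := ⟨hi - lo, by omega⟩
    have hm : lo + m - lo = m := by omega
    rw [hm, List.take_add, List.count_append]
    rw [Nat.lt_add_right_iff_pos]
    exact List.count_pos_iff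
  · have h1 : hi - lo = 0 := by omega
    have h2 : (s.take hi).count c ≤ (s.take lo).count c := by
      have heq : s.take hi = (s.take lo).take hi := by
        rw [List.take_take]; congr 1; omega
      rw [heq]
      exact (List.take_sublist _ _).count_le _
    simp only [h1, List.take_zero, List.not_mem_nil, iff_false, not_lt]
    omega

-- membership ↔ find ≠ -1 on a singleton pattern
theorem find_singleton_ne (t : List Char) (c : Char) :
    (PySem.Chars.find t [c] ≠ -1) ↔ c ∈ t := by
  rw [PySem.Chars.find_ne_neg_one_iff]
  exact List.singleton_infix_iff c t

-- per-query agreement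
theorem query_eq (S : String) (p q : Int) :
    (let s := PySem.Str.slice S (some p) (some (q + 1))
     if PySem.Str.find s "A" ≠ -1 then (1 : Int)
     else if PySem.Str.find s "C" ≠ -1 then 2
     else if PySem.Str.find s "G" ≠ -1 then 3
     else 4)
    = (let lo := PySem.List.clampIdx S.toList.length p
       let hi := PySem.List.clampIdx S.toList.length (q + 1)
       if (prefixCount S.toList 'A').getD hi 0 > (prefixCount S.toList 'A').getD lo 0 then (1 : Int)
       else if (prefixCount S.toList 'C').getD hi 0 > (prefixCount S.toList 'C').getD lo 0 then 2
       else if (prefixCount S.toList 'G').getD hi 0 > (prefixCount S.toList 'G').getD lo 0 then 3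
       else 4) := by
  have hlon : PySem.List.clampIdx S.toList.length p ≤ S.toList.length :=
    PySem.List.clampIdx_le _ _
  have hhin : PySem.List.clampIdx S.toList.length (q + 1) ≤ S.toList.length :=
    PySem.List.clampIdx_le _ _
  have hslice : (PySem.Str.slice S (some p) (some (q + 1))).toList
      = List.take (PySem.List.clampIdx S.toList.length (q + 1) - PySem.List.clampIdx S.toList.length p)
          (S.toList.drop (PySem.List.clampIdx S.toList.length p)) := by
    rw [PySem.Str.toList_slice, PySem.Chars.slice_eq_listSlice]
    rfl
  have key : ∀ c : Char,
      (PySem.Chars.find (PySem.Str.slice S (some p) (some (q + 1))).toList [c] ≠ -1)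
        ↔ ((prefixCount S.toList c).getD (PySem.List.clampIdx S.toList.length (q + 1)) 0
            > (prefixCount S.toList c).getD (PySem.List.clampIdx S.toList.length p) 0) := by
    intro c
    rw [hslice, find_singleton_ne,
      prefixCount_getD S.toList c _ hhin, prefixCount_getD S.toList c _ hlon]
    exact (count_seg S.toList c _ _).symm
  simp only [PySem.Str.find_eq]
  simp only [show ("A" : String).toList = ['A'] from rfl,
      show ("C" : String).toList = ['C'] from rfl,
      show ("G" : String).toList = ['G'] from rfl]
  by_cases hA : (prefixCount S.toList 'A').getD (PySem.List.clampIdx S.toList.length (q + 1)) 0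
      > (prefixCount S.toList 'A').getD (PySem.List.clampIdx S.toList.length p) 0
  · rw [if_pos ((key 'A').mpr hA), if_pos hA]
  · rw [if_neg (fun h => hA ((key 'A').mp h)), if_neg hA]
    by_cases hC : (prefixCount S.toList 'C').getD (PySem.List.clampIdx S.toList.length (q + 1)) 0
        > (prefixCount S.toList 'C').getD (PySem.List.clampIdx S.toList.length p) 0
    · rw [if_pos ((key 'C').mpr hC), if_pos hC]
    · rw [if_neg (fun h => hC ((key 'C').mp h)), if_neg hC]
      by_cases hG : (prefixCount S.toList 'G').getD (PySem.List.clampIdx S.toList.length (q + 1)) 0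
          > (prefixCount S.toList 'G').getD (PySem.List.clampIdx S.toList.length p) 0
      · rw [if_pos ((key 'G').mpr hG), if_pos hG]
      · rw [if_neg (fun h => hG ((key 'G').mp h)), if_neg hG]

-- ===== VERDICT (by name: the statement is the Claim_ definition above) =====
theorem solution_spec : Claim_equal_solution := by
  intro S P Q _hD
  show solution S P Q = solution_alt S P Q
  unfold solution solution_alt
  simp only []
  have ha : (fun (res : List Int) (pq : Int × Int) =>
      let s := PySem.Str.slice S (some pq.1) (some (pq.2 + 1))
      if PySem.Str.find s "A" ≠ -1 then res ++ [1]
      else if PySem.Str.find s "C" ≠ -1 then res ++ [2]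
      else if PySem.Str.find s "G" ≠ -1 then res ++ [3]
      else res ++ [4])
      = (fun (res : List Int) (pq : Int × Int) => res ++
        [(let s := PySem.Str.slice S (some pq.1) (some (pq.2 + 1))
          if PySem.Str.find s "A" ≠ -1 then (1 : Int)
          else if PySem.Str.find s "C" ≠ -1 then 2
          else if PySem.Str.find s "G" ≠ -1 then 3
          else 4)]) := by
    funext res pq; simp only []; split_ifs <;> rfl
  have hb : (fun (res : List Int) (pq : Int × Int) =>
      let lo := PySem.List.clampIdx S.toList.length pq.1
      let hi := PySem.List.clampIdx S.toList.length (pq.2 + 1)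
      if (prefixCount S.toList 'A').getD hi 0 > (prefixCount S.toList 'A').getD lo 0 then res ++ [1]
      else if (prefixCount S.toList 'C').getD hi 0 > (prefixCount S.toList 'C').getD lo 0 then res ++ [2]
      else if (prefixCount S.toList 'G').getD hi 0 > (prefixCount S.toList 'G').getD lo 0 then res ++ [3]
      else res ++ [4])
      = (fun (res : List Int) (pq : Int × Int) => res ++
        [(let lo := PySem.List.clampIdx S.toList.length pq.1
          let hi := PySem.List.clampIdx S.toList.length (pq.2 + 1)
          if (prefixCount S.toList 'A').getD hi 0 > (prefixCount S.toList 'A').getD lo 0 then (1 : Int)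
          else if (prefixCount S.toList 'C').getD hi 0 > (prefixCount S.toList 'C').getD lo 0 then 2
          else if (prefixCount S.toList 'G').getD hi 0 > (prefixCount S.toList 'G').getD lo 0 then 3
          else 4)]) := by
    funext res pq; simp only []; split_ifs <;> rfl
  rw [ha, hb, PySem.List.foldl_append_singleton_eq_map, PySem.List.foldl_append_singleton_eq_map]
  simp only [List.nil_append]
  apply List.map_congr_left
  intro pq _
  exact query_eq S pq.1 pq.2
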